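-- pv_equiv track=rewrite | github.com/Abrams666/Stock_Predict_AI | arrangement.py | arrangement
-- ===== SOURCE A (Python) =====
-- def arrangement(a,b):
--     total=a**b
--     c=[list() for _ in range(total)]
--     for i in range(total):
--         d=i
--         for j in range(b):
--             c[i].append(d%a)
--             d=d//a
--     return c
-- ===== SOURCE B (Python) =====
-- def arrangement(a, b):
--     total = a ** b
--     cur = [0] * b
--     res = []
--     for _ in range(total):
--         res.append(cur.copy())
--         carry = 1
--         j = 0
--         while carry and j < b:
--             carry, cur[j] = divmod(cur[j] + carry, a)
--             j += 1
--     return res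
-- ===== Notes on version B (the rewrite author's own statement) =====
-- stated objective: alternative
-- what changed: B replaces A's per-row derivation (each row rebuilt from its index i by repeated %a and //a) with a single running odometer: one digit vector incremented in place by divmod carry propagation, a copy appended per step, so rows are never recomputed from their index.
import Mathlib
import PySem

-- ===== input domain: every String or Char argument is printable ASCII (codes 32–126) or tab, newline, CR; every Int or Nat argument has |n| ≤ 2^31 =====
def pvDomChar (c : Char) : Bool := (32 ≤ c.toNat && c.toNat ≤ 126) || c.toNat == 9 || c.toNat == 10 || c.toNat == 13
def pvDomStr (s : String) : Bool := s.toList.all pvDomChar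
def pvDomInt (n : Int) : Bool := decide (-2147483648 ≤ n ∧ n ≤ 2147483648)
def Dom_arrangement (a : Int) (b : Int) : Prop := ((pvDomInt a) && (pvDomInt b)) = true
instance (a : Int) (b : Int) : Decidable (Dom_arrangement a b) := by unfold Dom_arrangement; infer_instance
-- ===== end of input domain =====

-- B replaces per-index %a,//a digit derivation with a single running odometer (divmod carry propagation): an alternative algorithm maintaining one digit vector.

-- ===== PORT A =====
-- total = a**b; row i = [d%a for j in range(b)] with d updated d//=a (appended into c[i])
def arrangement (a : Int) (b : Int) : List (List Int) :=
  (PySem.List.pyRange 0 (a ^ b.toNat) 1).map (fun i =>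
    ((PySem.List.pyRange 0 b 1).foldl
      (fun (st : List Int × Int) _ =>
        (st.1 ++ [PySem.Int.mod st.2 a], PySem.Int.floordiv st.2 a))
      (([] : List Int), i)).1)

-- ===== PORT B =====
-- the while-loop of Source B: while carry and j < b: carry, cur[j] = divmod(cur[j] + carry, a)
def pvIncr (a : Int) (carry : Int) : List Int → List Int
  | [] => []
  | x :: rest =>
      if carry == 0 then x :: rest
      else PySem.Int.mod (x + carry) a ::
           pvIncr a (PySem.Int.floordiv (x + carry) a) rest

def arrangement_alt (a : Int) (b : Int) : List (List Int) :=
  ((PySem.List.pyRange 0 (a ^ b.toNat) 1).foldl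
    (fun (st : List (List Int) × List Int) _ => (st.1 ++ [st.2], pvIncr a 1 st.2))
    (([] : List (List Int)), List.replicate b.toNat 0)).1

-- ===== PRECONDITION & SPEC =====
-- Pre_ excludes b < 0, where the Python A raises (TypeError on range(float), ZeroDivisionError for a = 0).
def Pre_arrangement (a : Int) (b : Int) : Prop := 0 ≤ b
instance (a : Int) (b : Int) : Decidable (Pre_arrangement a b) := by unfold Pre_arrangement; infer_instance
def pvWitness_arrangement : Int × Int := (2, 3)

def Spec_arrangement (a : Int) (b : Int) (out : List (List Int)) : Prop := out = arrangement_alt a b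
instance (a : Int) (b : Int) (out : List (List Int)) : Decidable (Spec_arrangement a b out) := by unfold Spec_arrangement; infer_instance

-- ===== CLAIM =====
def Claim_equal_arrangement : Prop := ∀ (a : Int) (b : Int), Dom_arrangement a b → Pre_arrangement a b → Spec_arrangement a b (arrangement a b)

-- ===== LEMMAS AND PROOFS =====

-- the base-a little-endian digit expansion of d, b digits
def pvDigits (a : Int) : Nat → Int → List Int
  | 0, _ => []
  | n + 1, d => PySem.Int.mod d a :: pvDigits a n (PySem.Int.floordiv d a)

theorem pv_inner_fold (a : Int) (l : List Int) (acc : List Int) (d : Int) :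
    (l.foldl (fun (st : List Int × Int) _ =>
        (st.1 ++ [PySem.Int.mod st.2 a], PySem.Int.floordiv st.2 a)) (acc, d)).1
      = acc ++ pvDigits a l.length d := by
  induction l generalizing acc d with
  | nil => simp [pvDigits]
  | cons x xs ih => simp [List.foldl, ih, pvDigits]

theorem pv_A_char (a b : Int) :
    arrangement a b
      = (PySem.List.pyRange 0 (a ^ b.toNat) 1).map (fun i => pvDigits a b.toNat i) := by
  unfold arrangement
  refine List.map_congr_left (fun i _ => ?_)
  rw [pv_inner_fold]
  simp [PySem.List.length_pyRange_one]

theorem pv_odo_fold (f : List Int → List Int) (l : List Int)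
    (acc : List (List Int)) (cur : List Int) :
    (l.foldl (fun (st : List (List Int) × List Int) _ =>
        (st.1 ++ [st.2], f st.2)) (acc, cur)).1
      = acc ++ (List.range l.length).map (fun k => f^[k] cur) := by
  induction l generalizing acc cur with
  | nil => simp
  | cons x xs ih =>
      rw [List.foldl_cons, ih]
      simp only [List.length_cons, List.range_succ_eq_map, List.map_cons,
        List.map_map, Function.iterate_zero, id_eq, List.append_assoc, List.cons_append,
        List.nil_append]
      simp [Function.comp_def, Function.iterate_succ_apply]

theorem pv_B_char (a b : Int) :
    arrangement_alt a b
      = (List.range (PySem.List.pyRange 0 (a ^ b.toNat) 1).length).map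
          (fun k => (pvIncr a 1)^[k] (List.replicate b.toNat 0)) := by
  unfold arrangement_alt
  rw [pv_odo_fold]
  simp

-- uniqueness of Python divmod (floor division; remainder has the divisor's sign)
theorem pv_fdm_unique (x a q r : Int) (ha : a ≠ 0) (h1 : q * a + r = x)
    (h2 : 0 ≤ r ∧ r < a ∨ a < r ∧ r ≤ 0) :
    PySem.Int.floordiv x a = q ∧ PySem.Int.mod x a = r := by
  have hq := PySem.Int.floordiv_mul_add_mod x a
  set Q := PySem.Int.floordiv x a with hQ
  set R := PySem.Int.mod x a with hR
  have hk : (Q - q) * a = r - R := by linear_combination hq - h1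
  rcases lt_or_gt_of_ne ha with hneg | hpos
  · have hb := PySem.Int.mod_neg_bounds (a := x) (b := a) hneg
    rcases h2 with ⟨h2a, h2b⟩ | ⟨h2a, h2b⟩
    · omega
    · have hQq : Q = q := by
        rcases lt_trichotomy (Q - q) 0 with h | h | h
        · nlinarith [hb.1, hb.2]
        · omega
        · nlinarith [hb.1, hb.2]
      refine ⟨hQq, ?_⟩
      rw [hQq] at hk; simp only [sub_self, zero_mul] at hk; omega
  · have hb1 := PySem.Int.mod_nonneg (a := x) (b := a) hpos
    have hb2 := PySem.Int.mod_lt (a := x) (b := a) hpos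
    rcases h2 with ⟨h2a, h2b⟩ | ⟨h2a, h2b⟩
    · have hQq : Q = q := by
        rcases lt_trichotomy (Q - q) 0 with h | h | h
        · nlinarith
        · omega
        · nlinarith
      refine ⟨hQq, ?_⟩
      rw [hQq] at hk; simp only [sub_self, zero_mul] at hk; omega
    · omega

theorem pv_residue (a r : Int) (ha : a ≠ 0) :
    0 ≤ PySem.Int.mod r a ∧ PySem.Int.mod r a < a ∨
    a < PySem.Int.mod r a ∧ PySem.Int.mod r a ≤ 0 := by
  rcases lt_or_gt_of_ne ha with hneg | hpos
  · right; exact PySem.Int.mod_neg_bounds (a := r) (b := a) hneg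
  · left; exact ⟨PySem.Int.mod_nonneg (a := r) (b := a) hpos, PySem.Int.mod_lt (a := r) (b := a) hpos⟩

theorem pv_digits_zero (a : Int) (ha : a ≠ 0) (n : Nat) :
    pvDigits a n 0 = List.replicate n 0 := by
  have h := pv_fdm_unique 0 a 0 0 ha (by ring)
    (by rcases lt_or_gt_of_ne ha with h | h
        · exact Or.inr ⟨h, le_refl 0⟩
        · exact Or.inl ⟨le_refl 0, h⟩)
  induction n with
  | zero => simp [pvDigits]
  | succ n ih => simp [pvDigits, h.1, h.2, ih, List.replicate_succ]

-- incrementing the truncated expansion by any carry is expanding d + carry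
theorem pv_incr_digits (a : Int) (ha : a ≠ 0) :
    ∀ (n : Nat) (c d : Int), pvIncr a c (pvDigits a n d) = pvDigits a n (d + c) := by
  intro n
  induction n with
  | zero => intro c d; simp [pvDigits, pvIncr]
  | succ n ih =>
      intro c d
      by_cases hc : c = 0
      · subst hc; simp [pvDigits, pvIncr]
      · have hA := PySem.Int.floordiv_mul_add_mod d a
        have hB := PySem.Int.floordiv_mul_add_mod (PySem.Int.mod d a + c) a
        have h1 : (PySem.Int.floordiv d a + PySem.Int.floordiv (PySem.Int.mod d a + c) a) * a
              + PySem.Int.mod (PySem.Int.mod d a + c) a = d + c := by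
          linear_combination hA + hB
        have hu := pv_fdm_unique (d + c) a _ _ ha h1 (pv_residue a (PySem.Int.mod d a + c) ha)
        simp only [pvDigits, pvIncr]
        rw [if_neg (by simp [hc]), ih, hu.1, hu.2]

theorem pv_iter_digits (a : Int) (ha : a ≠ 0) (n k : Nat) :
    (pvIncr a 1)^[k] (List.replicate n 0) = pvDigits a n (k : Int) := by
  induction k with
  | zero => simp [pv_digits_zero a ha n]
  | succ k ih =>
      rw [Function.iterate_succ_apply', ih, pv_incr_digits a ha n 1 (k : Int)]
      push_cast; ring_nf

theorem pv_trivial_empty (a b : Int) (h : a ^ b.toNat ≤ 0) :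
    arrangement a b = arrangement_alt a b := by
  rw [pv_A_char, pv_B_char, PySem.List.pyRange_one_eq_nil (by omega)]
  simp

-- ===== VERDICT (by name: the statement is the Claim_ definition above) =====
theorem arrangement_spec : Claim_equal_arrangement := by
  intro a b _ hb
  unfold Spec_arrangement
  unfold Pre_arrangement at hb
  by_cases ha : a = 0
  · subst ha
    by_cases hb0 : b = 0
    · subst hb0; decide
    · have hbn : b.toNat ≠ 0 := by omega
      exact pv_trivial_empty 0 b (le_of_eq (zero_pow hbn))
  · rw [pv_A_char, pv_B_char, PySem.List.pyRange_one]
    simp only [List.map_map, List.length_map, List.length_range]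
    refine List.map_congr_left (fun k _ => ?_)
    rw [pv_iter_digits a ha b.toNat k]
    simp
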